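-- pv_equiv track=rewrite | github.com/afishnamedqwerty/V-Net-JEPA | ops/varlen_pack.py | balance_sequences_by_tokens
-- ===== SOURCE A (Python) =====
-- from typing import List, Tuple, Optional
--
-- def balance_sequences_by_tokens(lengths: List[int], world_size: int) -> List[int]:
--     """
--     Greedy assignment of sequence indices to world_size bins to balance sum of lengths per rank.
--     Returns an assignment list 'rank_of_seq' of size B.
--     """
--     import heapq
--     # min-heap of (current_load, rank)
--     heap = [(0, r) for r in range(world_size)]
--     heapq.heapify(heap)
--     # pair (length, idx) and sort descending
--     order = sorted([(l, i) for i, l in enumerate(lengths)], reverse=True)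
--     rank_of_seq = [0] * len(lengths)
--     for l, i in order:
--         load, r = heapq.heappop(heap)
--         rank_of_seq[i] = r
--         heapq.heappush(heap, (load + l, r))
--     return rank_of_seq
-- ===== SOURCE B (Python) =====
-- def balance_sequences_by_tokens(lengths, world_size):
--     """Greedy LPT balancing with a flat per-rank load table scanned for its
--     first minimum, instead of a heap."""
--     order = sorted([(l, i) for i, l in enumerate(lengths)], reverse=True)
--     loads = [0] * world_size
--     rank_of_seq = [0] * len(lengths)
--     for l, i in order:
--         r = loads.index(min(loads))
--         rank_of_seq[i] = r
--         loads[r] += l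
--     return rank_of_seq
-- ===== Notes on version B (the rewrite author's own statement) =====
-- stated objective: simpler
-- what changed: The binary heap (heapq heapify/heappop/heappush) is replaced by a flat per-rank load list: each sequence is assigned to the first rank with minimal load via loads.index(min(loads)), which reproduces the heap's (load, rank) tie-breaking; the descending sort is unchanged.
import Mathlib
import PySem

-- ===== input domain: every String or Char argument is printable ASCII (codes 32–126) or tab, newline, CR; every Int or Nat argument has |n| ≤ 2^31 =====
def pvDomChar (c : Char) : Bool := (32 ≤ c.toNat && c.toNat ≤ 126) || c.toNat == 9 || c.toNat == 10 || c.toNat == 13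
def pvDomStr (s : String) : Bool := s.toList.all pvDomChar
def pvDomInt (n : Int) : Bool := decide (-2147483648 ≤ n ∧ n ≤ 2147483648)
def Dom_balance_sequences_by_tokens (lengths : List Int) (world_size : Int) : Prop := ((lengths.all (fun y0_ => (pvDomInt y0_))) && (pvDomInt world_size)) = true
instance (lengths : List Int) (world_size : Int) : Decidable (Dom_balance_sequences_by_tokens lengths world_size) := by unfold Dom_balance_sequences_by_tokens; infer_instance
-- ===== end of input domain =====

-- B replaces the heap with a flat load table scanned for its first minimum; same return value, proved below.

-- ===== PORT A =====
-- Python tuple '<' on (int, int): lexicographic strict comparison.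
def pvLt (a b : Int × Int) : Bool := decide (a.1 < b.1) || (decide (a.1 = b.1) && decide (a.2 < b.2))

def pvD0 : Int × Int := (0, 0)

-- heap[i] (indices are always in range in heapq's code; getD keeps the port total)
def pvAget (a : Array (Int × Int)) (i : Nat) : Int × Int := a.getD i pvD0

-- heapq._siftdown(heap, startpos, pos) with newitem = heap[pos] read by the caller.
def pvSiftdown (heap : Array (Int × Int)) (startpos pos : Nat) (newitem : Int × Int) : Array (Int × Int) :=
  if _h : startpos < pos then
    let parentpos := (pos - 1) / 2
    let parent := pvAget heap parentpos
    if pvLt newitem parent then pvSiftdown (heap.setIfInBounds pos parent) startpos parentpos newitem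
    else heap.setIfInBounds pos newitem
  else heap.setIfInBounds pos newitem
termination_by pos
decreasing_by omega

-- the while-loop of heapq._siftup (endpos = len(heap) is invariant: sets preserve size).
def pvSiftupLoop (heap : Array (Int × Int)) (startpos pos : Nat) (newitem : Int × Int) : Array (Int × Int) :=
  if _h : 2 * pos + 1 < heap.size then
    let childpos := if 2 * pos + 2 < heap.size ∧ pvLt (pvAget heap (2 * pos + 1)) (pvAget heap (2 * pos + 2)) = false
                    then 2 * pos + 2 else 2 * pos + 1
    pvSiftupLoop (heap.setIfInBounds pos (pvAget heap childpos)) startpos childpos newitem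
  else pvSiftdown (heap.setIfInBounds pos newitem) startpos pos newitem
termination_by heap.size - pos
decreasing_by simp only [Array.size_setIfInBounds]; split <;> omega

-- heapq._siftup(heap, pos)
def pvSiftup (heap : Array (Int × Int)) (pos : Nat) : Array (Int × Int) :=
  pvSiftupLoop heap pos pos (pvAget heap pos)

-- heapq.heapify: for i in reversed(range(n // 2)): _siftup(x, i)
def pvHeapify (heap : Array (Int × Int)) : Array (Int × Int) :=
  ((List.range (heap.size / 2)).reverse).foldl (fun h i => pvSiftup h i) heap

-- heapq.heappop; none = IndexError on the empty heap.
def pvHeappop (heap : Array (Int × Int)) : Option ((Int × Int) × Array (Int × Int)) :=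
  match heap.back? with
  | none => none
  | some lastelt =>
    let rest := heap.pop
    if rest.isEmpty then some (lastelt, #[])
    else some (pvAget rest 0, pvSiftup (rest.setIfInBounds 0 lastelt) 0)

-- heapq.heappush
def pvHeappush (heap : Array (Int × Int)) (item : Int × Int) : Array (Int × Int) :=
  pvSiftdown (heap.push item) 0 heap.size item

def balance_sequences_by_tokens (lengths : List Int) (world_size : Int) : List Int :=
  let heap0 := pvHeapify ((PySem.List.pyRange 0 world_size 1).map (fun r => ((0 : Int), r))).toArray
  let order := PySem.List.sorted2 ((PySem.List.enumerate lengths 0).map (fun p => (p.2, p.1)))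
                 (fun p => p.1) (fun p => p.2) true
  let st := order.foldl (fun (st : List Int × Array (Int × Int)) li =>
      match pvHeappop st.2 with
      | none => st   -- IndexError in Python: unreachable under Pre_
      | some ((load, r), h) => (PySem.List.pySetD st.1 li.2 r, pvHeappush h (load + li.1, r))
    ) (PySem.List.pyRepeat [(0 : Int)] lengths.length, heap0)
  st.1

-- ===== PORT B =====
def balance_sequences_by_tokens_alt (lengths : List Int) (world_size : Int) : List Int :=
  let order := PySem.List.sorted2 ((PySem.List.enumerate lengths 0).map (fun p => (p.2, p.1)))
                 (fun p => p.1) (fun p => p.2) true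
  let st := order.foldl (fun (st : List Int × List Int) li =>
      match PySem.List.min? st.2 (fun x => x) with
      | none => st   -- ValueError in Python: unreachable under Pre_
      | some m =>
        match PySem.List.index? st.2 m with
        | none => st -- unreachable: min is a member
        | some r => (PySem.List.pySetD st.1 li.2 (r : Int),
                     PySem.List.pySetD st.2 (r : Int) (PySem.List.pyGetD st.2 (r : Int) 0 + li.1))
    ) (PySem.List.pyRepeat [(0 : Int)] lengths.length, PySem.List.pyRepeat [(0 : Int)] world_size)
  st.1

-- ===== PRECONDITION & SPEC =====
-- A raises (IndexError popping an empty heap; B a ValueError from min([])) iff world_size < 1 with nonempty lengths.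
def Pre_balance_sequences_by_tokens (lengths : List Int) (world_size : Int) : Prop :=
  1 ≤ world_size ∨ lengths = []
instance (lengths : List Int) (world_size : Int) : Decidable (Pre_balance_sequences_by_tokens lengths world_size) := by
  unfold Pre_balance_sequences_by_tokens; infer_instance

def pvWitness_balance_sequences_by_tokens : List Int × Int := ([3, 1, 2], 2)

def Spec_balance_sequences_by_tokens (lengths : List Int) (world_size : Int) (out : List Int) : Prop := out = balance_sequences_by_tokens_alt lengths world_size
instance (lengths : List Int) (world_size : Int) (out : List Int) : Decidable (Spec_balance_sequences_by_tokens lengths world_size out) := by unfold Spec_balance_sequences_by_tokens; infer_instance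

-- ===== CLAIM (what is proved, stated in full; the proofs are below) =====
def Claim_equal_balance_sequences_by_tokens : Prop := ∀ (lengths : List Int) (world_size : Int), Dom_balance_sequences_by_tokens lengths world_size → Pre_balance_sequences_by_tokens lengths world_size → Spec_balance_sequences_by_tokens lengths world_size (balance_sequences_by_tokens lengths world_size)


-- ===== LEMMAS AND PROOFS =====

-- List-level models of the Array heap operations (proof helpers)
def pvSiftdownM (heap : List (Int × Int)) (startpos pos : Nat) (newitem : Int × Int) : List (Int × Int) :=
  if _h : startpos < pos then
    let parentpos := (pos - 1) / 2
    let parent := heap.getD parentpos pvD0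
    if pvLt newitem parent then pvSiftdownM (heap.set pos parent) startpos parentpos newitem
    else heap.set pos newitem
  else heap.set pos newitem
termination_by pos
decreasing_by omega

-- the while-loop of heapq._siftup (endpos = len(heap) is invariant: sets preserve length).
def pvSiftupLoopM (heap : List (Int × Int)) (startpos pos : Nat) (newitem : Int × Int) : List (Int × Int) :=
  if _h : 2 * pos + 1 < heap.length then
    let childpos := if 2 * pos + 2 < heap.length ∧ pvLt (heap.getD (2 * pos + 1) pvD0) (heap.getD (2 * pos + 2) pvD0) = false
                    then 2 * pos + 2 else 2 * pos + 1
    pvSiftupLoopM (heap.set pos (heap.getD childpos pvD0)) startpos childpos newitem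
  else pvSiftdownM (heap.set pos newitem) startpos pos newitem
termination_by heap.length - pos
decreasing_by simp only [List.length_set]; split <;> omega

-- heapq._siftup(heap, pos)
def pvSiftupM (heap : List (Int × Int)) (pos : Nat) : List (Int × Int) :=
  pvSiftupLoopM heap pos pos (heap.getD pos pvD0)

-- heapq.heapify: for i in reversed(range(n // 2)): _siftup(x, i)
def pvHeapifyM (heap : List (Int × Int)) : List (Int × Int) :=
  ((List.range (heap.length / 2)).reverse).foldl (fun h i => pvSiftupM h i) heap

-- heapq.heappop; none = IndexError on the empty heap.
def pvHeappopM (heap : List (Int × Int)) : Option ((Int × Int) × List (Int × Int)) :=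
  match heap.getLast? with
  | none => none
  | some lastelt =>
    let rest := heap.dropLast
    if rest.isEmpty then some (lastelt, [])
    else some (rest.getD 0 pvD0, pvSiftupM (rest.set 0 lastelt) 0)

-- heapq.heappush
def pvHeappushM (heap : List (Int × Int)) (item : Int × Int) : List (Int × Int) :=
  pvSiftdownM (heap ++ [item]) 0 heap.length item


-- lexicographic order facts
theorem pvLt_irrefl (a : Int × Int) : pvLt a a = false := by simp [pvLt]

theorem pvLt_asymm {a b : Int × Int} (h : pvLt a b = true) : pvLt b a = false := by
  rcases a with ⟨a1, a2⟩; rcases b with ⟨b1, b2⟩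
  simp [pvLt] at h ⊢; omega

theorem pvLe_trans {a b c : Int × Int} (h1 : pvLt a b = false) (h2 : pvLt b c = false) :
    pvLt a c = false := by
  rcases a with ⟨a1, a2⟩; rcases b with ⟨b1, b2⟩; rcases c with ⟨c1, c2⟩
  simp [pvLt] at h1 h2 ⊢; omega

theorem pvLt_trans_mix {n p s : Int × Int} (h1 : pvLt n p = true) (h2 : pvLt s p = false) :
    pvLt s n = false := by
  rcases n with ⟨a1, a2⟩; rcases p with ⟨b1, b2⟩; rcases s with ⟨c1, c2⟩
  simp [pvLt] at h1 h2 ⊢; omega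

-- subtree (ancestor) relation on heap indices
def pvBelowB (s j : Nat) : Bool :=
  if s = j then true
  else if 0 < j then pvBelowB s ((j - 1) / 2) else false
termination_by j
decreasing_by omega

theorem below_refl (s : Nat) : pvBelowB s s = true := by
  unfold pvBelowB; simp

theorem below_of_parent {s j : Nat} (hj : 0 < j) (h : pvBelowB s ((j - 1) / 2) = true) :
    pvBelowB s j = true := by
  unfold pvBelowB; split
  · rfl
  · simpa [hj]

theorem below_parent {s j : Nat} (h : pvBelowB s j = true) (hne : j ≠ s) :
    0 < j ∧ pvBelowB s ((j - 1) / 2) = true := by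
  unfold pvBelowB at h
  rcases Nat.eq_zero_or_pos j with h0 | h0
  · subst h0; simp [Ne.symm hne] at h
  · refine ⟨h0, ?_⟩; simpa [Ne.symm hne, h0] using h

theorem below_zero (j : Nat) : pvBelowB 0 j = true := by
  induction j using Nat.strong_induction_on with
  | _ j ih =>
    rcases Nat.eq_zero_or_pos j with h0 | h0
    · subst h0; exact below_refl 0
    · exact below_of_parent h0 (ih ((j - 1) / 2) (by omega))

theorem below_le {s j : Nat} (h : pvBelowB s j = true) : s ≤ j := by
  induction j using Nat.strong_induction_on with
  | _ j ih =>
    by_cases hsj : j = s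
    · omega
    · obtain ⟨h0, hp⟩ := below_parent h hsj
      have := ih ((j - 1) / 2) (by omega) hp; omega

theorem below_child1 {s p : Nat} (h : pvBelowB s p = true) : pvBelowB s (2 * p + 1) = true := by
  apply below_of_parent (by omega); rw [show (2 * p + 1 - 1) / 2 = p by omega]; exact h

theorem below_child2 {s p : Nat} (h : pvBelowB s p = true) : pvBelowB s (2 * p + 2) = true := by
  apply below_of_parent (by omega); rw [show (2 * p + 2 - 1) / 2 = p by omega]; exact h

theorem below_trans {a b c : Nat} (h1 : pvBelowB a b = true) (h2 : pvBelowB b c = true) :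
    pvBelowB a c = true := by
  induction c using Nat.strong_induction_on with
  | _ c ih =>
    by_cases hbc : c = b
    · subst hbc; exact h1
    · obtain ⟨h0, hp⟩ := below_parent h2 hbc
      exact below_of_parent h0 (ih ((c - 1) / 2) (by omega) hp)

theorem below_total {i k j : Nat} (h1 : pvBelowB i j = true) (h2 : pvBelowB k j = true) :
    pvBelowB i k = true ∨ pvBelowB k i = true := by
  induction j using Nat.strong_induction_on with
  | _ j ih =>
    by_cases hij : j = i
    · subst hij; right; exact h2
    · by_cases hkj : j = k
      · subst hkj; left; exact h1
      · obtain ⟨h0, hp1⟩ := below_parent h1 hij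
        obtain ⟨_, hp2⟩ := below_parent h2 hkj
        exact ih ((j - 1) / 2) (by omega) hp1 hp2

theorem below_leaf {k j n : Nat} (h : pvBelowB k j = true) (hj : j < n) (hk : n / 2 ≤ k) :
    j = k := by
  by_cases hjk : j = k
  · exact hjk
  · obtain ⟨h0, hp⟩ := below_parent h hjk
    have := below_le hp; omega

theorem below_step {k j : Nat} (h : pvBelowB k j = true) (hne : j ≠ k) :
    pvBelowB (2 * k + 1) j = true ∨ pvBelowB (2 * k + 2) j = true := by
  induction j using Nat.strong_induction_on with
  | _ j ih =>
    obtain ⟨h0, hp⟩ := below_parent h hne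
    by_cases hpk : (j - 1) / 2 = k
    · have : j = 2 * k + 1 ∨ j = 2 * k + 2 := by omega
      rcases this with h' | h' <;> subst h' <;> [left; right] <;> exact below_refl _
    · rcases ih ((j - 1) / 2) (by omega) hp hpk with h' | h'
      · left; exact below_of_parent h0 h'
      · right; exact below_of_parent h0 h'

-- heap property on the subtree rooted at s
def pvHeapAt (h : List (Int × Int)) (s : Nat) : Prop :=
  ∀ j, 0 < j → j < h.length → pvBelowB s j = true → j ≠ s →
    pvLt (h.getD j pvD0) (h.getD ((j - 1) / 2) pvD0) = false

theorem heapAt_of_leaf (h : List (Int × Int)) (k : Nat) (hk : h.length / 2 ≤ k) :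
    pvHeapAt h k := by
  intro j h0 hj hb hne
  exact absurd (below_leaf hb hj hk) hne

theorem root_min {h : List (Int × Int)} (hh : pvHeapAt h 0) :
    ∀ j, j < h.length → pvLt (h.getD j pvD0) (h.getD 0 pvD0) = false := by
  intro j
  induction j using Nat.strong_induction_on with
  | _ j ih =>
    intro hj
    rcases Nat.eq_zero_or_pos j with h0 | h0
    · subst h0; exact pvLt_irrefl _
    · have e := hh j h0 hj (below_zero j) (by omega)
      exact pvLe_trans e (ih ((j - 1) / 2) (by omega) (by omega))

-- multiset bookkeeping for List.set
theorem pv_ms_set {α : Type} (l : List α) (n : Nat) (v d : α) (hn : n < l.length) :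
    ((l.set n v : List α) : Multiset α) + {l.getD n d} = (l : Multiset α) + {v} := by
  have hset : l.set n v = l.take n ++ v :: l.drop (n + 1) := by
    rw [List.set_eq_take_append_cons_drop, if_pos hn]
  have hl : l = l.take n ++ l[n] :: l.drop (n + 1) := by
    conv_lhs => rw [← List.take_append_drop n l]
    rw [List.getElem_cons_drop hn]
  have hg : l.getD n d = l[n] := List.getD_eq_getElem l d hn
  rw [hset, hg]
  conv_rhs => rw [hl]
  simp only [← Multiset.coe_add, ← Multiset.cons_coe]
  push_cast
  simp [← Multiset.singleton_add]
  abel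

theorem pv_length_siftdown (h : List (Int × Int)) (start pos : Nat) (item : Int × Int) :
    (pvSiftdownM h start pos item).length = h.length := by
  fun_induction pvSiftdownM h start pos item <;> simp_all

theorem pv_length_siftupLoop (h : List (Int × Int)) (start pos : Nat) (item : Int × Int) :
    (pvSiftupLoopM h start pos item).length = h.length := by
  fun_induction pvSiftupLoopM h start pos item <;>
    simp_all [pv_length_siftdown]

theorem pv_getD_set_ne (h : List (Int × Int)) (p j : Nat) (v : Int × Int) (hne : j ≠ p) :
    (h.set p v).getD j pvD0 = h.getD j pvD0 := by
  simp [List.getD_eq_getElem?_getD, List.getElem?_set_ne (Ne.symm hne)]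

theorem pv_getD_set_self (h : List (Int × Int)) (p : Nat) (v : Int × Int) (hp : p < h.length) :
    (h.set p v).getD p pvD0 = v := by
  simp [List.getD_eq_getElem?_getD, List.getElem?_set_self, hp]

theorem pv_ms_siftdown (h : List (Int × Int)) (start pos : Nat) (item : Int × Int) :
    pos < h.length →
    ((pvSiftdownM h start pos item : List _) : Multiset _) + {h.getD pos pvD0}
      = (h : Multiset _) + {item} := by
  fun_induction pvSiftdownM h start pos item with
  | case1 h pos hlt pp pr hcmp ih =>
    intro hp
    have hpp : (pos - 1) / 2 < pos := by omega
    have ih' := ih (by simpa using by omega)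
    rw [pv_getD_set_ne h pos _ _ (by omega)] at ih'
    have hms := pv_ms_set h pos (h.getD ((pos - 1) / 2) pvD0) pvD0 hp
    have key : ((pvSiftdownM (h.set pos (h.getD ((pos - 1) / 2) pvD0)) start ((pos - 1) / 2) item : List _) : Multiset _)
        + {h.getD pos pvD0} + {h.getD ((pos - 1) / 2) pvD0}
        = (h : Multiset _) + {item} + {h.getD ((pos - 1) / 2) pvD0} := by
      calc ((pvSiftdownM (h.set pos (h.getD ((pos - 1) / 2) pvD0)) start ((pos - 1) / 2) item : List _) : Multiset _)
            + {h.getD pos pvD0} + {h.getD ((pos - 1) / 2) pvD0}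
          = (((h.set pos (h.getD ((pos - 1) / 2) pvD0) : List _) : Multiset _) + {item}) + {h.getD pos pvD0} := by
            rw [← ih']; abel
        _ = ((h : Multiset _) + {h.getD ((pos - 1) / 2) pvD0}) + {item} := by
            rw [add_right_comm, hms]
        _ = _ := by abel
    exact add_right_cancel key
  | case2 h pos hlt pp pr hcmp => intro hp; exact pv_ms_set _ _ _ _ hp
  | case3 h pos hlt => intro hp; exact pv_ms_set _ _ _ _ hp

theorem pv_ms_siftupLoop (h : List (Int × Int)) (start pos : Nat) (item : Int × Int) :
    pos < h.length →
    ((pvSiftupLoopM h start pos item : List _) : Multiset _) + {h.getD pos pvD0}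
      = (h : Multiset _) + {item} := by
  fun_induction pvSiftupLoopM h start pos item with
  | case1 heap pos h1 cp ih =>
    intro hp
    have hcp : pos < cp ∧ cp < heap.length := by
      by_cases hc : 2 * pos + 2 < heap.length ∧ pvLt (heap.getD (2 * pos + 1) pvD0) (heap.getD (2 * pos + 2) pvD0) = false
      · simp only [cp]; rw [dif_pos hc]; omega
      · simp only [cp]; rw [dif_neg hc]; omega
    have ih' := ih (by simpa using hcp.2)
    rw [pv_getD_set_ne heap pos cp _ (by omega)] at ih'
    have hms := pv_ms_set heap pos (heap.getD cp pvD0) pvD0 hp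
    have key : ((pvSiftupLoopM (heap.set pos (heap.getD cp pvD0)) start cp item : List _) : Multiset _)
        + {heap.getD pos pvD0} + {heap.getD cp pvD0}
        = (heap : Multiset _) + {item} + {heap.getD cp pvD0} := by
      calc ((pvSiftupLoopM (heap.set pos (heap.getD cp pvD0)) start cp item : List _) : Multiset _)
            + {heap.getD pos pvD0} + {heap.getD cp pvD0}
          = (((heap.set pos (heap.getD cp pvD0) : List _) : Multiset _) + {item}) + {heap.getD pos pvD0} := by
            rw [← ih']; abel
        _ = ((heap : Multiset _) + {heap.getD cp pvD0}) + {item} := by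
            rw [add_right_comm, hms]
        _ = _ := by abel
    exact add_right_cancel key
  | case2 heap pos h1 =>
    intro hp
    have h2 := pv_ms_siftdown (heap.set pos item) start pos item (by simpa using hp)
    rw [pv_getD_set_self heap pos item hp] at h2
    have h3 := add_right_cancel h2
    rw [h3]
    exact pv_ms_set heap pos item pvD0 hp

theorem pv_outside_siftdown (h : List (Int × Int)) (start pos : Nat) (item : Int × Int) :
    pvBelowB start pos = true → ∀ j, pvBelowB start j = false →
    (pvSiftdownM h start pos item).getD j pvD0 = h.getD j pvD0 := by
  fun_induction pvSiftdownM h start pos item with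
  | case1 h pos hlt pp pr hcmp ih =>
    intro hbp j hbj
    have hps : pos ≠ start := by have := below_le hbp; omega
    have hpp : pvBelowB start ((pos - 1) / 2) = true := (below_parent hbp hps).2
    rw [ih hpp j hbj, pv_getD_set_ne]
    intro hjp; rw [hjp] at hbj; rw [hbj] at hbp; exact absurd hbp (by simp)
  | case2 h pos hlt pp pr hcmp =>
    intro hbp j hbj
    rw [pv_getD_set_ne]
    intro hjp; rw [hjp] at hbj; rw [hbj] at hbp; exact absurd hbp (by simp)
  | case3 h pos hlt =>
    intro hbp j hbj
    rw [pv_getD_set_ne]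
    intro hjp; rw [hjp] at hbj; rw [hbj] at hbp; exact absurd hbp (by simp)

theorem pv_outside_siftupLoop (h : List (Int × Int)) (start pos : Nat) (item : Int × Int) :
    pvBelowB start pos = true → ∀ j, pvBelowB start j = false →
    (pvSiftupLoopM h start pos item).getD j pvD0 = h.getD j pvD0 := by
  fun_induction pvSiftupLoopM h start pos item with
  | case1 heap pos h1 cp ih =>
    intro hbp j hbj
    have hcp : cp = 2 * pos + 1 ∨ cp = 2 * pos + 2 := by
      by_cases hc : 2 * pos + 2 < heap.length ∧ pvLt (heap.getD (2 * pos + 1) pvD0) (heap.getD (2 * pos + 2) pvD0) = false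
      · simp only [cp]; rw [dif_pos hc]; omega
      · simp only [cp]; rw [dif_neg hc]; omega
    have hbcp : pvBelowB start cp = true := by
      rcases hcp with h' | h' <;> rw [h']
      · exact below_child1 hbp
      · exact below_child2 hbp
    rw [ih hbcp j hbj, pv_getD_set_ne]
    intro hjp; rw [hjp] at hbj; rw [hbj] at hbp; exact absurd hbp (by simp)
  | case2 heap pos h1 =>
    intro hbp j hbj
    rw [pv_outside_siftdown _ _ _ _ hbp j hbj, pv_getD_set_ne]
    intro hjp; rw [hjp] at hbj; rw [hbj] at hbp; exact absurd hbp (by simp)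

theorem pv_heapAt_siftdown (h : List (Int × Int)) (start pos : Nat) (item : Int × Int) :
    start ≤ pos → pos < h.length → pvBelowB start pos = true →
    (∀ j, 0 < j → j < h.length → pvBelowB start j = true → j ≠ start → j ≠ pos →
       (j - 1) / 2 ≠ pos → pvLt (h.getD j pvD0) (h.getD ((j - 1) / 2) pvD0) = false) →
    (∀ j, 0 < j → j < h.length → (j - 1) / 2 = pos → pvLt (h.getD j pvD0) item = false) →
    (start < pos → ∀ j, 0 < j → j < h.length → (j - 1) / 2 = pos →
       pvLt (h.getD j pvD0) (h.getD ((pos - 1) / 2) pvD0) = false) →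
    pvHeapAt (pvSiftdownM h start pos item) start := by
  fun_induction pvSiftdownM h start pos item with
  | case1 h pos hlt pp pr hcmp ih =>
    intro hsp hp hbpos hb hc hd
    have hpne : (pos - 1) / 2 ≠ pos := by omega
    have hbpp : pvBelowB start ((pos - 1) / 2) = true := (below_parent hbpos (by omega)).2
    apply ih (below_le hbpp) (by simpa using by omega) hbpp
    · -- hb'
      intro j h0 hj hbj hjs hjpp hparpp
      rw [List.length_set] at hj
      have hjpos : j ≠ pos := by intro he; subst he; exact hparpp rfl
      by_cases hparpos : (j - 1) / 2 = pos
      · -- child of pos: new parent value is pr = h[(pos-1)/2]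
        rw [pv_getD_set_ne h pos j _ hjpos, hparpos, pv_getD_set_self h pos _ hp]
        exact hd hlt j h0 hj hparpos
      · rw [pv_getD_set_ne h pos j _ hjpos, pv_getD_set_ne h pos _ _ hparpos]
        exact hb j h0 hj hbj hjs hjpos hparpos
    · -- hc'
      intro j h0 hj hpar
      rw [List.length_set] at hj
      by_cases hjpos : j = pos
      · subst hjpos
        rw [pv_getD_set_self h j _ hp]
        exact pvLt_asymm hcmp
      · rw [pv_getD_set_ne h pos j _ hjpos]
        have hj12 : j = 2 * ((pos - 1) / 2) + 1 ∨ j = 2 * ((pos - 1) / 2) + 2 := by omega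
        have hbj : pvBelowB start j = true := by
          rcases hj12 with h' | h' <;> rw [h']
          · exact below_child1 hbpp
          · exact below_child2 hbpp
        have hedge := hb j h0 hj hbj (by have := below_le hbpp; omega) hjpos (by omega)
        rw [hpar] at hedge
        exact pvLt_trans_mix hcmp hedge
    · -- hd'
      intro hspp j h0 hj hpar
      rw [List.length_set] at hj
      have hppp : ((pos - 1) / 2 - 1) / 2 ≠ pos := by omega
      rw [pv_getD_set_ne h pos _ _ hppp]
      have hedgepp := hb ((pos - 1) / 2) (by omega) (by omega) hbpp (by omega) (by omega) (by omega)
      by_cases hjpos : j = pos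
      · subst hjpos
        rw [pv_getD_set_self h j _ hp]
        exact hedgepp
      · rw [pv_getD_set_ne h pos j _ hjpos]
        have hj12 : j = 2 * ((pos - 1) / 2) + 1 ∨ j = 2 * ((pos - 1) / 2) + 2 := by omega
        have hbj : pvBelowB start j = true := by
          rcases hj12 with h' | h' <;> rw [h']
          · exact below_child1 hbpp
          · exact below_child2 hbpp
        have hedge := hb j h0 hj hbj (by have := below_le hbpp; omega) hjpos (by omega)
        rw [hpar] at hedge
        exact pvLe_trans hedge hedgepp
  | case2 h pos hlt pp pr hcmp =>
    intro hsp hp hbpos hb hc hd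
    intro j h0 hj hbj hjs
    rw [List.length_set] at hj
    have hppne : (pos - 1) / 2 ≠ pos := by omega
    by_cases hjpos : j = pos
    · subst hjpos
      rw [pv_getD_set_self h j _ hp, pv_getD_set_ne h j _ _ hppne]
      exact Bool.not_eq_true _ ▸ (by simpa using hcmp)
    · by_cases hparpos : (j - 1) / 2 = pos
      · rw [pv_getD_set_ne h pos j _ hjpos, hparpos, pv_getD_set_self h pos _ hp]
        exact hc j h0 hj hparpos
      · rw [pv_getD_set_ne h pos j _ hjpos, pv_getD_set_ne h pos _ _ hparpos]
        exact hb j h0 hj hbj hjs hjpos hparpos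
  | case3 h pos hlt =>
    intro hsp hp hbpos hb hc hd
    have hps : pos = start := by omega
    subst hps
    intro j h0 hj hbj hjs
    rw [List.length_set] at hj
    have hjpos : j ≠ pos := hjs
    by_cases hparpos : (j - 1) / 2 = pos
    · rw [pv_getD_set_ne h pos j _ hjpos, hparpos, pv_getD_set_self h pos _ hp]
      exact hc j h0 hj hparpos
    · rw [pv_getD_set_ne h pos j _ hjpos, pv_getD_set_ne h pos _ _ hparpos]
      exact hb j h0 hj hbj hjs hjpos hparpos

theorem pv_heapAt_siftupLoop (h : List (Int × Int)) (start pos : Nat) (item : Int × Int) :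
    start ≤ pos → pos < h.length → pvBelowB start pos = true →
    (∀ j, 0 < j → j < h.length → pvBelowB start j = true → j ≠ start → j ≠ pos →
       (j - 1) / 2 ≠ pos → pvLt (h.getD j pvD0) (h.getD ((j - 1) / 2) pvD0) = false) →
    (start < pos → ∀ j, 0 < j → j < h.length → (j - 1) / 2 = pos →
       pvLt (h.getD j pvD0) (h.getD ((pos - 1) / 2) pvD0) = false) →
    pvHeapAt (pvSiftupLoopM h start pos item) start := by
  fun_induction pvSiftupLoopM h start pos item with
  | case1 heap pos h1 cp ih =>
    intro hsp hp hbpos hb he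
    have hcp : (cp = 2 * pos + 1 ∨ cp = 2 * pos + 2) ∧ cp < heap.length := by
      by_cases hc : 2 * pos + 2 < heap.length ∧ pvLt (heap.getD (2 * pos + 1) pvD0) (heap.getD (2 * pos + 2) pvD0) = false
      · simp only [cp]; rw [dif_pos hc]; omega
      · simp only [cp]; rw [dif_neg hc]; omega
    have hposcp : pos < cp := by rcases hcp.1 with h' | h' <;> omega
    have hparcp : (cp - 1) / 2 = pos := by rcases hcp.1 with h' | h' <;> omega
    have hbcp : pvBelowB start cp = true := by
      rcases hcp.1 with h' | h' <;> rw [h']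
      · exact below_child1 hbpos
      · exact below_child2 hbpos
    -- sibling of cp among children of pos is ≥ heap[cp]
    have hsib : ∀ j, 0 < j → j < heap.length → (j - 1) / 2 = pos → j ≠ cp →
        pvLt (heap.getD j pvD0) (heap.getD cp pvD0) = false := by
      intro j h0 hj hpar hjcp
      by_cases hc : 2 * pos + 2 < heap.length ∧ pvLt (heap.getD (2 * pos + 1) pvD0) (heap.getD (2 * pos + 2) pvD0) = false
      · have hcpv : cp = 2 * pos + 2 := by simp only [cp]; rw [dif_pos hc]
        have hjv : j = 2 * pos + 1 := by omega
        rw [hjv, hcpv]; exact hc.2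
      · have hcpv : cp = 2 * pos + 1 := by simp only [cp]; rw [dif_neg hc]
        have hjv : j = 2 * pos + 2 := by omega
        rw [hjv, hcpv]
        apply pvLt_asymm
        rcases not_and_or.mp hc with h' | h'
        · omega
        · simpa using h'
    apply ih (by omega) (by simpa using hcp.2) hbcp
    · -- hb'
      intro j h0 hj hbj hjs hjcp hparcp'
      rw [List.length_set] at hj
      by_cases hjpos : j = pos
      · subst hjpos
        have hjs' : start < j := lt_of_le_of_ne hsp (by omega)
        have hppne : (j - 1) / 2 ≠ j := by omega
        rw [pv_getD_set_self heap j _ hp, pv_getD_set_ne heap j _ _ (by omega)]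
        exact he hjs' cp (by omega) hcp.2 hparcp
      · by_cases hparpos : (j - 1) / 2 = pos
        · rw [pv_getD_set_ne heap pos j _ hjpos, hparpos, pv_getD_set_self heap pos _ hp]
          exact hsib j h0 hj hparpos hjcp
        · rw [pv_getD_set_ne heap pos j _ hjpos, pv_getD_set_ne heap pos _ _ hparpos]
          exact hb j h0 hj hbj hjs hjpos hparpos
    · -- he'
      intro _ j h0 hj hpar
      rw [List.length_set] at hj
      have hjpos : j ≠ pos := by omega
      have hjcp : j ≠ cp := by omega
      rw [hparcp, pv_getD_set_ne heap pos j _ hjpos, pv_getD_set_self heap pos _ hp]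
      have hj12 : j = 2 * cp + 1 ∨ j = 2 * cp + 2 := by omega
      have hbj : pvBelowB start j = true := by
        rcases hj12 with h' | h' <;> rw [h']
        · exact below_child1 hbcp
        · exact below_child2 hbcp
      have hres := hb j h0 hj hbj (by omega) hjpos (by omega)
      rw [hpar] at hres
      exact hres
  | case2 heap pos h1 =>
    intro hsp hp hbpos hb he
    apply pv_heapAt_siftdown _ _ _ _ hsp (by simpa using hp) hbpos
    · intro j h0 hj hbj hjs hjpos hparpos
      rw [List.length_set] at hj
      rw [pv_getD_set_ne heap pos j _ hjpos, pv_getD_set_ne heap pos _ _ hparpos]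
      exact hb j h0 hj hbj hjs hjpos hparpos
    · intro j h0 hj hpar
      rw [List.length_set] at hj
      omega
    · intro _ j h0 hj hpar
      rw [List.length_set] at hj
      omega

theorem pv_siftup_spec (h : List (Int × Int)) (pos : Nat) (hp : pos < h.length)
    (hb : ∀ j, 0 < j → j < h.length → pvBelowB pos j = true → j ≠ pos →
       (j - 1) / 2 ≠ pos → pvLt (h.getD j pvD0) (h.getD ((j - 1) / 2) pvD0) = false) :
    pvHeapAt (pvSiftupM h pos) pos ∧
    (↑(pvSiftupM h pos) : Multiset (Int × Int)) = (↑h : Multiset (Int × Int)) ∧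
    (pvSiftupM h pos).length = h.length ∧
    (∀ j, pvBelowB pos j = false → (pvSiftupM h pos).getD j pvD0 = h.getD j pvD0) := by
  refine ⟨?_, ?_, ?_, ?_⟩
  · apply pv_heapAt_siftupLoop h pos pos _ le_rfl hp (below_refl pos)
    · intro j h0 hj hbj hjs hjp hpar
      exact hb j h0 hj hbj hjs hpar
    · omega
  · have := pv_ms_siftupLoop h pos pos (h.getD pos pvD0) hp
    exact add_right_cancel this
  · exact pv_length_siftupLoop h pos pos _
  · exact pv_outside_siftupLoop h pos pos _ (below_refl pos)

theorem pv_heapify_go : ∀ (i : Nat) (h : List (Int × Int)), i ≤ h.length →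
    (∀ k, i ≤ k → pvHeapAt h k) →
    (((List.range i).reverse).foldl (fun h i => pvSiftupM h i) h).length = h.length ∧
    (↑(((List.range i).reverse).foldl (fun h i => pvSiftupM h i) h) : Multiset (Int × Int)) = (↑h : Multiset (Int × Int)) ∧
    (∀ k, pvHeapAt (((List.range i).reverse).foldl (fun h i => pvSiftupM h i) h) k) := by
  intro i
  induction i with
  | zero =>
    intro h _ hpre
    exact ⟨rfl, rfl, fun k => hpre k (Nat.zero_le k)⟩
  | succ i ih =>
    intro h hlen hpre
    rw [List.range_succ, List.reverse_append, List.reverse_singleton, List.singleton_append,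
      List.foldl_cons]
    have hip : i < h.length := by omega
    have hbspec := pv_siftup_spec h i hip (by
      intro j h0 hj hbj hji hpar
      rcases below_step hbj hji with hbc | hbc
      · have := hpre (2 * i + 1) (by omega) j h0 hj hbc (by omega)
        exact this
      · have := hpre (2 * i + 2) (by omega) j h0 hj hbc (by omega)
        exact this)
    obtain ⟨hHA, hMS, hLEN, hOUT⟩ := hbspec
    have hpre' : ∀ k, i ≤ k → pvHeapAt (pvSiftupM h i) k := by
      intro k hk
      rcases Nat.eq_or_lt_of_le hk with hk' | hk'
      · subst hk'; exact hHA
      · by_cases hbik : pvBelowB i k = true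
        · intro j h0 hj hbkj hjk
          have hbij : pvBelowB i j = true := below_trans hbik hbkj
          have hkj := below_le hbkj
          exact hHA j h0 hj hbij (by omega)
        · intro j h0 hj hbkj hjk
          rw [hLEN] at hj
          have hbij : pvBelowB i j = false := by
            rcases Bool.eq_false_or_eq_true (pvBelowB i j) with h' | h'
            · rcases below_total h' hbkj with h'' | h''
              · exact absurd h'' (by simp [hbik])
              · have := below_le h''; omega
            · exact h'
          have hbkpar := (below_parent hbkj hjk).2
          have hbipj : pvBelowB i ((j - 1) / 2) = false := by
            rcases Bool.eq_false_or_eq_true (pvBelowB i ((j - 1) / 2)) with h' | h'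
            · rcases below_total h' hbkpar with h'' | h''
              · exact absurd h'' (by simp [hbik])
              · have := below_le h''; omega
            · exact h'
          rw [hOUT j hbij, hOUT _ hbipj]
          exact hpre k (by omega) j h0 hj hbkj hjk
    have := ih (pvSiftupM h i) (by omega) hpre'
    refine ⟨by rw [this.1, hLEN], by rw [this.2.1, hMS], this.2.2⟩

theorem pv_heapify_spec (h : List (Int × Int)) :
    (pvHeapifyM h).length = h.length ∧
    (↑(pvHeapifyM h) : Multiset (Int × Int)) = (↑h : Multiset (Int × Int)) ∧
    pvHeapAt (pvHeapifyM h) 0 := by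
  have go := pv_heapify_go (h.length / 2) h (Nat.le_of_lt_succ (by
      have := Nat.div_le_self h.length 2; omega))
    (fun k hk => heapAt_of_leaf h k hk)
  exact ⟨go.1, go.2.1, go.2.2 0⟩

theorem pv_pop_spec (h : List (Int × Int)) (hne : h ≠ []) (hh : pvHeapAt h 0) :
    ∃ h', pvHeappopM h = some (h.getD 0 pvD0, h') ∧ h'.length + 1 = h.length ∧ pvHeapAt h' 0 ∧
      ((h.getD 0 pvD0) ::ₘ (↑h' : Multiset (Int × Int))) = (↑h : Multiset (Int × Int)) := by
  have hlast : h.getLast? = some (h.getLast hne) := List.getLast?_eq_some_getLast hne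
  have hlen0 : 0 < h.length := List.length_pos_iff.mpr hne
  rcases Nat.lt_or_ge h.length 2 with hlen1 | hlen2
  · have h1 : h.length = 1 := by omega
    obtain ⟨a, ha⟩ := List.length_eq_one_iff.mp h1
    subst ha
    refine ⟨[], ?_, by simp, ?_, ?_⟩
    · simp [pvHeappopM]
    · intro j _ hj; simp at hj
    · simp
  · have hrlen : h.dropLast.length = h.length - 1 := List.length_dropLast
    have hrne : h.dropLast ≠ [] := by
      intro he; rw [he] at hrlen; simp at hrlen; omega
    have hstep : pvHeappopM h = some (h.dropLast.getD 0 pvD0,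
        pvSiftupM (h.dropLast.set 0 (h.getLast hne)) 0) := by
      unfold pvHeappopM
      rw [hlast]
      simp only [List.isEmpty_iff]
      rw [if_neg hrne]
    have hg0 : h.dropLast.getD 0 pvD0 = h.getD 0 pvD0 := by
      have h0r : 0 < h.dropLast.length := by omega
      rw [List.getD_eq_getElem _ _ h0r, List.getD_eq_getElem _ _ hlen0]
      exact List.getElem_dropLast _
    set h2 := h.dropLast.set 0 (h.getLast hne) with hh2
    have hlen2' : h2.length = h.length - 1 := by rw [hh2, List.length_set, hrlen]
    have hgd : ∀ j, 0 < j → j < h2.length → h2.getD j pvD0 = h.getD j pvD0 := by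
      intro j h0 hj
      rw [hh2, pv_getD_set_ne _ _ _ _ (by omega)]
      rw [List.getD_eq_getElem _ _ (by omega : j < h.dropLast.length),
        List.getD_eq_getElem _ _ (by omega : j < h.length)]
      exact List.getElem_dropLast _
    have hspec := pv_siftup_spec h2 0 (by omega) (by
      intro j h0 hj hbj hjs hpar
      rw [hgd j h0 hj, hgd ((j - 1) / 2) (by omega) (by omega)]
      exact hh j h0 (by omega) (below_zero j) hjs)
    obtain ⟨hHA, hMS, hLEN, _⟩ := hspec
    refine ⟨_, by rw [hstep, hg0], by omega, hHA, ?_⟩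
    have hmsset := pv_ms_set h.dropLast 0 (h.getLast hne) pvD0 (by omega)
    have hsplit : (↑h.dropLast : Multiset (Int × Int)) + {h.getLast hne} = (↑h : Multiset (Int × Int)) := by
      conv_rhs => rw [← List.dropLast_append_getLast hne]
      simp [← Multiset.coe_add, ← Multiset.singleton_add]
    rw [hMS, ← Multiset.singleton_add, add_comm, ← hg0, hmsset, hsplit]

theorem pv_push_spec (h : List (Int × Int)) (item : Int × Int) (hh : pvHeapAt h 0) :
    (pvHeappushM h item).length = h.length + 1 ∧ pvHeapAt (pvHeappushM h item) 0 ∧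
    (↑(pvHeappushM h item) : Multiset (Int × Int)) = item ::ₘ (↑h : Multiset (Int × Int)) := by
  have hlen : (h ++ [item]).length = h.length + 1 := by simp
  have hgd : ∀ j, j < h.length → (h ++ [item]).getD j pvD0 = h.getD j pvD0 := by
    intro j hj
    rw [List.getD_eq_getElem _ _ (by omega : j < (h ++ [item]).length),
      List.getD_eq_getElem _ _ hj]
    exact List.getElem_append_left hj
  have hgditem : (h ++ [item]).getD h.length pvD0 = item := by
    rw [List.getD_eq_getElem _ _ (by omega : h.length < (h ++ [item]).length)]
    simp
  refine ⟨?_, ?_, ?_⟩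
  · unfold pvHeappushM; rw [pv_length_siftdown, hlen]
  · unfold pvHeappushM
    apply pv_heapAt_siftdown (h ++ [item]) 0 h.length item (Nat.zero_le _) (by omega)
      (below_zero _)
    · intro j h0 hj hbj hjs hjpos hpar
      rw [hlen] at hj
      have hjlt : j < h.length := by omega
      rw [hgd j hjlt, hgd _ (by omega)]
      exact hh j h0 hjlt hbj hjs
    · intro j h0 hj hpar; rw [hlen] at hj; omega
    · intro _ j h0 hj hpar; rw [hlen] at hj; omega
  · unfold pvHeappushM
    have := pv_ms_siftdown (h ++ [item]) 0 h.length item (by omega)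
    rw [hgditem] at this
    have h2 := add_right_cancel this
    rw [h2]
    simp [← Multiset.coe_add, ← Multiset.singleton_add]
    abel

-- the abstract state: the heap's contents as a function of the load table
def pvTable (loads : List Int) : List (Int × Int) :=
  (List.range loads.length).map (fun k => (loads.getD k 0, (k : Int)))

theorem pvTable_length (loads : List Int) : (pvTable loads).length = loads.length := by
  simp [pvTable]

theorem pvTable_getD (loads : List Int) (k : Nat) (hk : k < loads.length) :
    (pvTable loads).getD k pvD0 = (loads.getD k 0, (k : Int)) := by
  rw [List.getD_eq_getElem _ _ (by simpa [pvTable] using hk)]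
  simp [pvTable]

theorem pvTable_mem {loads : List Int} {x : Int × Int} :
    x ∈ pvTable loads ↔ ∃ k, k < loads.length ∧ x = (loads.getD k 0, (k : Int)) := by
  simp only [pvTable, List.mem_map, List.mem_range]
  constructor
  · rintro ⟨k, hk, rfl⟩; exact ⟨k, hk, rfl⟩
  · rintro ⟨k, hk, rfl⟩; exact ⟨k, hk, rfl⟩

theorem pvTable_set (loads : List Int) (r : Nat) (v : Int) (hr : r < loads.length) :
    pvTable (loads.set r v) = (pvTable loads).set r (v, (r : Int)) := by
  apply List.ext_getElem
  · simp [pvTable]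
  · intro k hk hk'
    have hkl : k < loads.length := by simpa [pvTable] using hk
    by_cases hkr : k = r
    · subst hkr
      rw [List.getElem_set_self (by simpa [pvTable] using hkl)]
      simp [pvTable, List.getD_eq_getElem?_getD, List.getElem?_set_self, hr]
    · rw [List.getElem_set_ne (by omega)]
      simp [pvTable, List.getD_eq_getElem?_getD, List.getElem?_set_ne (by omega : r ≠ k)]

theorem pv_root_is_min (heap : List (Int × Int)) (loads : List Int)
    (hms : (↑heap : Multiset (Int × Int)) = (↑(pvTable loads) : Multiset (Int × Int)))
    (hh : pvHeapAt heap 0) (hne : heap ≠ []) :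
    ∃ r0 : Nat, r0 < loads.length ∧ heap.getD 0 pvD0 = (loads.getD r0 0, (r0 : Int)) ∧
      (∀ q, q < loads.length → loads.getD r0 0 ≤ loads.getD q 0) ∧
      (∀ q, q < r0 → loads.getD q 0 ≠ loads.getD r0 0) := by
  have hperm : heap.Perm (pvTable loads) := Multiset.coe_eq_coe.mp hms
  have hlen0 : 0 < heap.length := List.length_pos_iff.mpr hne
  have hrootmem : heap.getD 0 pvD0 ∈ heap := by
    rw [List.getD_eq_getElem _ _ hlen0]; exact List.getElem_mem hlen0
  obtain ⟨r0, hr0, hroot⟩ := pvTable_mem.mp (hperm.mem_iff.mp hrootmem)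
  have hminall : ∀ q, q < loads.length →
      pvLt (loads.getD q 0, (q : Int)) (heap.getD 0 pvD0) = false := by
    intro q hq
    have hqmem : (loads.getD q 0, (q : Int)) ∈ heap :=
      hperm.mem_iff.mpr (pvTable_mem.mpr ⟨q, hq, rfl⟩)
    obtain ⟨j, hj, hje⟩ := List.mem_iff_getElem.mp hqmem
    have := root_min hh j hj
    rw [List.getD_eq_getElem _ _ hj, hje] at this
    exact this
  refine ⟨r0, hr0, hroot, ?_, ?_⟩
  · intro q hq
    have := hminall q hq
    rw [hroot] at this
    simp only [pvLt, Bool.or_eq_false_iff, Bool.and_eq_false_iff, decide_eq_false_iff_not] at this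
    omega
  · intro q hq he
    have := hminall q (by omega)
    rw [hroot] at this
    simp only [pvLt, Bool.or_eq_false_iff, Bool.and_eq_false_iff, decide_eq_false_iff_not] at this
    obtain ⟨h1, h2⟩ := this
    rcases h2 with h2 | h2
    · exact h2 he
    · exact absurd (by exact_mod_cast hq : (q : Int) < (r0 : Int)) h2

theorem pv_min_eq (loads : List Int) (r0 : Nat) (hr0 : r0 < loads.length)
    (hmin : ∀ q, q < loads.length → loads.getD r0 0 ≤ loads.getD q 0) :
    PySem.List.min? loads (fun x => x) = some (loads.getD r0 0) := by
  have hne : loads ≠ [] := by intro he; rw [he] at hr0; simp at hr0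
  obtain ⟨m, hm⟩ : ∃ m, PySem.List.min? loads (fun x => x) = some m := by
    cases he : PySem.List.min? loads (fun x => x) with
    | none => exact absurd ((PySem.List.min?_eq_none_iff _ _).mp he) hne
    | some m => exact ⟨m, rfl⟩
  have hmmem : m ∈ loads := PySem.List.min?_mem hm
  obtain ⟨q, hq, hqe⟩ := List.mem_iff_getElem.mp hmmem
  have h1 : loads.getD r0 0 ≤ m := by
    have := hmin q hq
    rw [List.getD_eq_getElem _ _ hq, hqe] at this
    exact this
  have h2 : m ≤ loads.getD r0 0 := by
    have := PySem.List.min?_isMin hm (loads.getD r0 0) (by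
      rw [List.getD_eq_getElem _ _ hr0]; exact List.getElem_mem hr0)
    exact this
  rw [hm]
  congr 1
  omega

theorem pv_index_eq (loads : List Int) (r0 : Nat) (hr0 : r0 < loads.length)
    (hfirst : ∀ q, q < r0 → loads.getD q 0 ≠ loads.getD r0 0) :
    PySem.List.index? loads (loads.getD r0 0) = some r0 := by
  apply (PySem.List.index?_eq_some_iff _ _ _).mpr
  refine ⟨loads.take r0, loads.drop (r0 + 1), ?_, by simp [List.length_take]; omega, ?_⟩
  · rw [List.getD_eq_getElem _ _ hr0]
    conv_lhs => rw [← List.take_append_drop r0 loads]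
    rw [← List.getElem_cons_drop hr0]
  · intro hmem
    obtain ⟨q, hq, hqe⟩ := List.mem_iff_getElem.mp hmem
    have hqlen : q < r0 := by
      have := List.length_take_le r0 loads; have := hq; simp [List.length_take] at this; omega
    rw [List.getElem_take] at hqe
    exact hfirst q hqlen (by rw [← hqe, List.getD_eq_getElem _ _ (by omega)])

-- ===== Array/List bridges: the Array port computes the List model via toList =====
theorem pvAGetD (a : Array (Int × Int)) (i : Nat) :
    pvAget a i = a.toList.getD i pvD0 := by
  rw [pvAget]
  by_cases h : i < a.size
  · rw [Array.getD, dif_pos h, List.getD_eq_getElem _ _ (by simpa [Array.length_toList] using h)]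
    simp
  · rw [Array.getD, dif_neg h, List.getD_eq_default _ _ (by simpa [Array.length_toList] using h)]

theorem pv_toList_siftdown (a : Array (Int × Int)) (s p : Nat) (x : Int × Int) :
    (pvSiftdown a s p x).toList = pvSiftdownM a.toList s p x := by
  fun_induction pvSiftdown a s p x with
  | case1 a p hlt pp pr hcmp ih =>
    rw [pvSiftdownM]
    rw [dif_pos hlt, if_pos (by rw [← pvAGetD]; exact hcmp)]
    rw [ih, Array.toList_setIfInBounds]
    simp only [pr, pp]
    rw [pvAGetD]
  | case2 a p hlt pp pr hcmp =>
    rw [pvSiftdownM]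
    rw [dif_pos hlt, if_neg (by rw [← pvAGetD]; exact hcmp)]
    exact Array.toList_setIfInBounds
  | case3 a p hlt =>
    rw [pvSiftdownM, dif_neg hlt]
    exact Array.toList_setIfInBounds

theorem pv_toList_siftupLoop (a : Array (Int × Int)) (s p : Nat) (x : Int × Int) :
    (pvSiftupLoop a s p x).toList = pvSiftupLoopM a.toList s p x := by
  fun_induction pvSiftupLoop a s p x with
  | case1 a p h1 cp ih =>
    rw [pvSiftupLoopM]
    rw [dif_pos (by simpa [Array.length_toList] using h1)]
    have hcond : (2 * p + 2 < a.toList.length ∧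
        pvLt (a.toList.getD (2 * p + 1) pvD0) (a.toList.getD (2 * p + 2) pvD0) = false)
        ↔ (2 * p + 2 < a.size ∧
        pvLt (pvAget a (2 * p + 1)) (pvAget a (2 * p + 2)) = false) := by
      rw [Array.length_toList, pvAGetD, pvAGetD]
    have hcp : (if 2 * p + 2 < a.toList.length ∧
        pvLt (a.toList.getD (2 * p + 1) pvD0) (a.toList.getD (2 * p + 2) pvD0) = false
        then 2 * p + 2 else 2 * p + 1) = cp := by
      by_cases hc : 2 * p + 2 < a.size ∧
          pvLt (pvAget a (2 * p + 1)) (pvAget a (2 * p + 2)) = false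
      · rw [if_pos (hcond.mpr hc)]; simp only [cp]; rw [dif_pos hc]
      · rw [if_neg (fun hx => hc (hcond.mp hx))]; simp only [cp]; rw [dif_neg hc]
    rw [hcp, ih, Array.toList_setIfInBounds, pvAGetD]
  | case2 a p h1 =>
    rw [pvSiftupLoopM]
    rw [dif_neg (by simpa [Array.length_toList] using h1)]
    rw [pv_toList_siftdown, Array.toList_setIfInBounds]

theorem pv_toList_siftup (a : Array (Int × Int)) (p : Nat) :
    (pvSiftup a p).toList = pvSiftupM a.toList p := by
  unfold pvSiftup pvSiftupM
  rw [pv_toList_siftupLoop, pvAGetD]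

theorem pv_toList_heapify (a : Array (Int × Int)) :
    (pvHeapify a).toList = pvHeapifyM a.toList := by
  unfold pvHeapify pvHeapifyM
  rw [Array.length_toList]
  generalize (List.range (a.size / 2)).reverse = l
  induction l generalizing a with
  | nil => rfl
  | cons i t ih =>
    rw [List.foldl_cons, List.foldl_cons, ← pv_toList_siftup, ih]

theorem pv_isEmpty_toList (a : Array (Int × Int)) : a.isEmpty = a.toList.isEmpty := by
  rw [Array.isEmpty]
  rcases he : a.toList with _ | ⟨x, t⟩
  · have h0 : a.size = 0 := by rw [← Array.length_toList, he]; rfl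
    simp [h0]
  · have h0 : a.size ≠ 0 := by rw [← Array.length_toList, he]; simp
    simp [h0]

theorem pv_toList_heappop (a : Array (Int × Int)) :
    pvHeappop a = (pvHeappopM a.toList).map (fun p => (p.1, p.2.toArray)) := by
  unfold pvHeappop pvHeappopM
  have hback : a.back? = a.toList.getLast? := by
    rw [Array.back?_eq_getElem?, List.getLast?_eq_getElem?, Array.length_toList,
      Array.getElem?_toList]
  rw [hback]
  cases hl : a.toList.getLast? with
  | none => rfl
  | some lastelt =>
    simp only [Option.map_some]
    have hpop : a.pop.toList = a.toList.dropLast := Array.toList_pop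
    by_cases hre : a.toList.dropLast.isEmpty
    · rw [if_pos (by rw [pv_isEmpty_toList, hpop]; exact hre), if_pos hre]
      rfl
    · rw [if_neg (by rw [pv_isEmpty_toList, hpop]; exact hre), if_neg hre]
      congr 1
      refine Prod.ext ?_ ?_
      · show pvAget a.pop 0 = a.toList.dropLast.getD 0 pvD0
        rw [pvAGetD, hpop]
      · show pvSiftup (a.pop.setIfInBounds 0 lastelt) 0
          = (pvSiftupM (a.toList.dropLast.set 0 lastelt) 0).toArray
        rw [← Array.toList_inj, pv_toList_siftup, Array.toList_setIfInBounds, hpop,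
          List.toList_toArray]

theorem pv_toList_heappush (a : Array (Int × Int)) (x : Int × Int) :
    (pvHeappush a x).toList = pvHeappushM a.toList x := by
  unfold pvHeappush pvHeappushM
  rw [pv_toList_siftdown, Array.toList_push, Array.length_toList]

theorem pv_fold_sim (order : List (Int × Int)) : ∀ (ranks : List Int)
    (heap : Array (Int × Int)) (loads : List Int),
    loads ≠ [] →
    (↑heap.toList : Multiset (Int × Int)) = (↑(pvTable loads) : Multiset (Int × Int)) →
    pvHeapAt heap.toList 0 →
    (order.foldl (fun (st : List Int × Array (Int × Int)) li =>
        match pvHeappop st.2 with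
        | none => st
        | some ((load, r), h) => (PySem.List.pySetD st.1 li.2 r, pvHeappush h (load + li.1, r))
      ) (ranks, heap)).1
    = (order.foldl (fun (st : List Int × List Int) li =>
        match PySem.List.min? st.2 (fun x => x) with
        | none => st
        | some m =>
          match PySem.List.index? st.2 m with
          | none => st
          | some r => (PySem.List.pySetD st.1 li.2 (r : Int),
                       PySem.List.pySetD st.2 (r : Int) (PySem.List.pyGetD st.2 (r : Int) 0 + li.1))
      ) (ranks, loads)).1 := by
  induction order with
  | nil => intro ranks heap loads _ _ _; rfl
  | cons li rest ih =>
    intro ranks heap loads hlne hms hh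
    have hlen : heap.toList.length = loads.length := by
      have := congrArg Multiset.card hms
      simpa [pvTable] using this
    have hl0 : 0 < loads.length := List.length_pos_iff.mpr hlne
    have hhne : heap.toList ≠ [] := by
      intro he; rw [he] at hlen; simp at hlen; omega
    obtain ⟨h', hpop, hplen, hph, hpms⟩ := pv_pop_spec heap.toList hhne hh
    obtain ⟨r0, hr0, hroot, hmin, hfirst⟩ := pv_root_is_min heap.toList loads hms hh hhne
    have hminq := pv_min_eq loads r0 hr0 hmin
    have hidx := pv_index_eq loads r0 hr0 hfirst
    rw [hroot] at hpop hpms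
    have hpopA : pvHeappop heap = some ((loads.getD r0 0, (r0 : Int)), h'.toArray) := by
      rw [pv_toList_heappop, hpop]; rfl
    simp only [List.foldl_cons, hpopA, hminq]
    simp only [hidx]
    have heqB : PySem.List.pySetD loads ((r0 : Int)) (PySem.List.pyGetD loads ((r0 : Int)) 0 + li.1)
        = loads.set r0 (loads.getD r0 0 + li.1) := by
      rw [PySem.List.pyGetD_natCast, PySem.List.pySetD_natCast]
    rw [heqB]
    -- re-establish the invariant for the next step
    set v := loads.getD r0 0 + li.1 with hv
    apply ih
    · intro he
      have hlen0 : loads.length = 0 := by simpa using congrArg List.length he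
      exact hlne (List.eq_nil_of_length_eq_zero hlen0)
    · obtain ⟨hpushlen, hpushheap, hpushms⟩ :=
        pv_push_spec h' (loads.getD r0 0 + li.1, (r0 : Int)) hph
      rw [pv_toList_heappush, List.toList_toArray, hpushms]
      have htab := pvTable_set loads r0 v hr0
      have hmsset := pv_ms_set (pvTable loads) r0 (v, (r0 : Int)) pvD0 (by rw [pvTable_length]; omega)
      rw [pvTable_getD loads r0 hr0] at hmsset
      have key : ((loads.getD r0 0 + li.1, (r0 : Int)) ::ₘ (↑h' : Multiset (Int × Int)))
            + {(loads.getD r0 0, (r0 : Int))}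
          = (↑(pvTable (loads.set r0 v)) : Multiset (Int × Int)) + {(loads.getD r0 0, (r0 : Int))} := by
        rw [htab]
        calc ((loads.getD r0 0 + li.1, (r0 : Int)) ::ₘ (↑h' : Multiset (Int × Int)))
              + {(loads.getD r0 0, (r0 : Int))}
            = ((loads.getD r0 0, (r0 : Int)) ::ₘ (↑h' : Multiset (Int × Int)))
              + {(loads.getD r0 0 + li.1, (r0 : Int))} := by
              simp only [← Multiset.singleton_add]; abel
          _ = (↑(pvTable loads) : Multiset (Int × Int)) + {(v, (r0 : Int))} := by
              rw [hpms, hms]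
          _ = _ := by rw [← hmsset]
      exact add_right_cancel key
    · rw [pv_toList_heappush, List.toList_toArray]
      exact (pv_push_spec h' (loads.getD r0 0 + li.1, (r0 : Int)) hph).2.1

theorem pv_init_table (world_size : Int) (hw : 1 ≤ world_size) :
    (PySem.List.pyRange 0 world_size 1).map (fun r => ((0 : Int), r))
      = pvTable (PySem.List.pyRepeat [(0 : Int)] world_size) := by
  rw [PySem.List.pyRepeat_singleton]
  apply List.ext_getElem
  · simp [pvTable, PySem.List.length_pyRange_one]
  · intro k hk hk'
    have hkw : k < world_size.toNat := by
      simpa [PySem.List.length_pyRange_one] using hk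
    rw [List.getElem_map, PySem.List.getElem_pyRange_one 0 world_size k
      (by simpa [PySem.List.length_pyRange_one] using hkw)]
    have hki : (k : Int) < world_size := by omega
    simp [pvTable, List.getD_eq_getElem?_getD, List.getElem?_replicate, hki]

-- ===== VERDICT (by name: the statement is the Claim_ definition above) =====
theorem balance_sequences_by_tokens_spec : Claim_equal_balance_sequences_by_tokens := by
  intro lengths world_size _dom hpre
  unfold Spec_balance_sequences_by_tokens
  unfold balance_sequences_by_tokens balance_sequences_by_tokens_alt
  rcases hpre with hw | hnil
  · -- 1 ≤ world_size : the simulation invariant holds initially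
    have hrep : PySem.List.pyRepeat [(0 : Int)] world_size
        = List.replicate world_size.toNat 0 := PySem.List.pyRepeat_singleton 0 world_size
    have hlne : PySem.List.pyRepeat [(0 : Int)] world_size ≠ [] := by
      rw [hrep]
      intro he
      have := congrArg List.length he
      simp at this
      omega
    obtain ⟨hhlen, hhms, hhheap⟩ :=
      pv_heapify_spec ((PySem.List.pyRange 0 world_size 1).map (fun r => ((0 : Int), r)))
    have hbr : (pvHeapify ((PySem.List.pyRange 0 world_size 1).map
        (fun r => ((0 : Int), r))).toArray).toList
        = pvHeapifyM ((PySem.List.pyRange 0 world_size 1).map (fun r => ((0 : Int), r))) := by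
      rw [pv_toList_heapify, List.toList_toArray]
    exact pv_fold_sim _ _ _ _ hlne
      (by rw [hbr, hhms, pv_init_table world_size hw]) (by rw [hbr]; exact hhheap)
  · subst hnil
    have hord : PySem.List.sorted2
        ((PySem.List.enumerate ([] : List Int) 0).map (fun p => (p.2, p.1)))
        (fun p => p.1) (fun p => p.2) true = [] := by
      have := PySem.List.sorted2_perm
        ((PySem.List.enumerate ([] : List Int) 0).map (fun p => (p.2, p.1)))
        (fun p => p.1) (fun p => p.2) true
      simp [PySem.List.enumerate] at this ⊢
      exact this
    rw [hord]
    rfl
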